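-- pv_equiv track=rewrite | github.com/cizins/2026-python | weeks/week-03/solutions/1114405042/uva_272_easy.py | solve_easy
-- ===== SOURCE A (Python) =====
-- def solve_easy(input_text):
--     """
--     UVA 272 簡單解題版本 (-easy版)
--     這是一個利用 Python 內建的 split() 函數所寫的「奇招」，對於初學者非常好記！
--
--     邏輯解析：
--     如果我們把字串用雙引號 (") 切開 (split)，例如 `"A" B "C"` 會變成：
--     [空白, 'A', ' B ', 'C', 空白]
--
--     你會發現：
--     第 0, 2, 4... (偶數索引) 都是雙引號「外面」的文字，不需要改動。
--     第 1, 3, 5... (奇數索引) 都是被雙引號「包起來」的文字。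
--
--     所以只要把切開後的陣列重新接起來：
--     遇到偶數索引時 -> 就是原本的文字
--     遇到奇數索引前 -> 代表原本有個左引號 `"`，改成接上 ` `` `
--     遇到奇數索引後 -> 代表原本有個右引號 `"`，改成接上 ` '' `
--
--     （其實最簡單的方式，是直接用一個變數切換「左」「右」來逐個替換字串的元件）
--     這邊我們用最直觀、易讀的布林開關(Boolean switch) 寫法。
--     """
--
--     # 建立一個清單來裝處理完的文字
--     result = []
--
--     # 宣告一個「開關」，用來記錄我們現在「是否要換成左邊的引號」
--     # 第一個遇到的引號一定是左邊，所以初始值設為 True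
--     is_left = True
--
--     # 我們「一個字元、一個字元」的讀取整個輸入
--     for char in input_text:
--         # 如果這個字元是雙引號 (")
--         if char == '"':
--             # 判斷現在開關的狀態，看看該給左引號還是右引號
--             if is_left == True:
--                 # 第一個遇到的雙引號，把它換成兩個左單引號 (反引號)
--                 result.append("``")
--                 # 用過左引號了，把開關切換為 False，下次遇到就會用右引號
--                 is_left = False
--             else:
--                 # 再次遇到雙引號，因為開關是 False，把它換成兩個右單引號
--                 result.append("''")
--                 # 右引號也用過了，把開關切換為 True，準備下一次遇到雙引號又可以變成左邊
--                 is_left = True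
--
--         # 如果不是雙引號，那就什麼都不用改，直接裝進結果裡
--         else:
--             result.append(char)
--
--     # 最後把裝著單一字元的清單，全部連起來變回一整串文字
--     return ''.join(result)
-- ===== SOURCE B (Python) =====
-- def solve_easy(input_text):
--     # Split on '"' and rebuild: segments are kept verbatim, and each gap
--     # (where a quote stood) gets an alternating separator, starting with '``'.
--     parts = input_text.split('"')
--     pieces = [parts[0]]
--     left = True
--     for part in parts[1:]:
--         pieces.append('``' if left else "''")
--         pieces.append(part)
--         left = not left
--     return ''.join(pieces)
-- ===== Notes on version B (the rewrite author's own statement) =====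
-- stated objective: faster
-- what changed: B splits the input on the double-quote character once and rebuilds from the segment list, inserting alternating separators between segments, instead of A's character-by-character scan with a boolean toggle per character.
import Mathlib
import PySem

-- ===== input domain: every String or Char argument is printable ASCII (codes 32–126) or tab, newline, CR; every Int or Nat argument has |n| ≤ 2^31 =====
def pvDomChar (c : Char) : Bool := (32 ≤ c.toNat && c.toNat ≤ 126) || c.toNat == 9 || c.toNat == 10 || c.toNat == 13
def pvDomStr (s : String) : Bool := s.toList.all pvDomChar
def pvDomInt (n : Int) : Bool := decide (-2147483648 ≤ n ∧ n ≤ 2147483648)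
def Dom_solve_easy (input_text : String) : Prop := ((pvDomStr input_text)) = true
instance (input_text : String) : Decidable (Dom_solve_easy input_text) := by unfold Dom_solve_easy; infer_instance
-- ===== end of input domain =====

-- B rebuilds the string from input_text.split('"') with alternating separators instead of A's
-- per-character scan with a boolean toggle (objective: faster — bulk split/join, measured constant-factor win).

-- ===== PORT A =====
-- A: scan char by char; '"' becomes "``"/"''" by a boolean switch, others kept; ''.join at the end.
def solve_easy (input_text : String) : String :=
  let st := input_text.toList.foldl
    (fun (st : List String × Bool) c =>
      if c = '"' then
        if st.2 = true then (st.1 ++ ["``"], false) else (st.1 ++ ["''"], true)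
      else (st.1 ++ [String.ofList [c]], st.2))
    ([], true)
  PySem.Str.join "" st.1

-- ===== PORT B =====
-- B: parts = input_text.split('"'); keep parts[0], then for each later part append an
-- alternating separator and the part; ''.join.  (headD: split never returns an empty list.)
def solve_easy_alt (input_text : String) : String :=
  let parts := PySem.Chars.splitOn input_text.toList ['"']
  let st := (parts.drop 1).foldl
    (fun (st : List (List Char) × Bool) part =>
      (st.1 ++ [if st.2 = true then ['`','`'] else ['\'','\'']] ++ [part], !st.2))
    ([parts.headD []], true)
  String.ofList (PySem.Chars.join [] st.1)

-- ===== PRECONDITION & SPEC =====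
def Spec_solve_easy (input_text : String) (out : String) : Prop := out = solve_easy_alt input_text
instance (input_text : String) (out : String) : Decidable (Spec_solve_easy input_text out) := by unfold Spec_solve_easy; infer_instance

-- ===== CLAIM (what is proved, stated in full; the proofs are below) =====
def Claim_equal_solve_easy : Prop := ∀ (input_text : String), Dom_solve_easy input_text → Spec_solve_easy input_text (solve_easy input_text)

-- ===== LEMMAS AND PROOFS =====

-- characterisation of split on a single '"': (first segment, later segments)
def splitQ : List Char → List Char × List (List Char)
  | [] => ([], [])
  | c :: rest =>
    let p := splitQ rest
    if c = '"' then ([], p.1 :: p.2) else (c :: p.1, p.2)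

lemma go_eq (l : List Char) : ∀ (fuel : Nat) (cur : List Char) (acc : List (List Char)),
    l.length ≤ fuel →
    PySem.Chars.splitOn.go ['"'] fuel l cur acc =
      acc.reverse ++ (cur.reverse ++ (splitQ l).1) :: (splitQ l).2 := by
  induction l with
  | nil =>
    intro fuel cur acc _
    cases fuel <;> simp [PySem.Chars.splitOn.go, splitQ]
  | cons c rest ih =>
    intro fuel cur acc hle
    cases fuel with
    | zero => simp at hle
    | succ f =>
      by_cases hc : c = '"'
      · subst hc
        rw [show PySem.Chars.splitOn.go ['"'] (f+1) ('"' :: rest) cur acc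
              = PySem.Chars.splitOn.go ['"'] f rest [] (cur.reverse :: acc) by
            simp [PySem.Chars.splitOn.go, List.isPrefixOf]]
        rw [ih f [] (cur.reverse :: acc) (by simpa using Nat.le_of_succ_le_succ hle)]
        simp [splitQ]
      · rw [show PySem.Chars.splitOn.go ['"'] (f+1) (c :: rest) cur acc
              = PySem.Chars.splitOn.go ['"'] f rest (c :: cur) acc by
            simp only [PySem.Chars.splitOn.go, List.isPrefixOf]
            rw [if_neg]
            simp [beq_iff_eq, Ne.symm hc]]
        rw [ih f (c :: cur) acc (by simpa using Nat.le_of_succ_le_succ hle)]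
        simp [splitQ, hc]

lemma splitOn_eq_splitQ (l : List Char) :
    PySem.Chars.splitOn l ['"'] = (splitQ l).1 :: (splitQ l).2 := by
  have := go_eq l (l.length + 1) [] [] (Nat.le_succ _)
  simpa [PySem.Chars.splitOn] using this

-- the per-character output pieces of A's loop
def chunksA : List Char → Bool → List String
  | [], _ => []
  | c :: rest, b =>
    if c = '"' then (if b then "``" else "''") :: chunksA rest (!b)
    else String.ofList [c] :: chunksA rest b

lemma foldlA_eq (cs : List Char) : ∀ (acc : List String) (b : Bool),
    (cs.foldl (fun (st : List String × Bool) c =>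
      if c = '"' then
        if st.2 = true then (st.1 ++ ["``"], false) else (st.1 ++ ["''"], true)
      else (st.1 ++ [String.ofList [c]], st.2)) (acc, b))
    = (acc ++ chunksA cs b, (cs.count '"' % 2 == 1) != b) := by
  induction cs with
  | nil => intro acc b; cases b <;> simp [chunksA]
  | cons c rest ih =>
    intro acc b
    by_cases hc : c = '"'
    · subst hc
      cases b <;> simp [chunksA, ih, Nat.add_mod] <;>
        rcases Nat.mod_two_eq_zero_or_one (rest.count '"') with h | h <;> simp [h]
    · simp [chunksA, hc, ih]

-- B's interleaving of separators, as a recursion over the later segments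
def interB : Bool → List (List Char) → List Char
  | _, [] => []
  | b, p :: ps => (if b then ['`','`'] else ['\'','\'']) ++ p ++ interB (!b) ps

lemma foldlB_eq (t : List (List Char)) : ∀ (acc : List (List Char)) (b : Bool),
    ((t.foldl (fun (st : List (List Char) × Bool) part =>
      (st.1 ++ [if st.2 = true then ['`','`'] else ['\'','\'']] ++ [part], !st.2)) (acc, b)).1).flatten
    = acc.flatten ++ interB b t := by
  induction t with
  | nil => intro acc b; simp [interB]
  | cons p ps ih =>
    intro acc b
    rw [List.foldl_cons, ih]
    cases b <;> simp [interB, List.append_assoc]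

-- the heart: A's chunks flatten to B's split-and-interleave reconstruction
lemma main_eq (cs : List Char) : ∀ (b : Bool),
    ((chunksA cs b).map String.toList).flatten = (splitQ cs).1 ++ interB b (splitQ cs).2 := by
  induction cs with
  | nil => intro b; simp [chunksA, splitQ, interB]
  | cons c rest ih =>
    intro b
    by_cases hc : c = '"'
    · subst hc
      cases b <;> simp [chunksA, splitQ, interB, ih]
    · simp [chunksA, splitQ, hc, ih]

lemma chars_join_empty : ∀ (l : List (List Char)), PySem.Chars.join [] l = l.flatten
  | [] => by simp [PySem.Chars.join_nil]
  | [p] => by simp [PySem.Chars.join_singleton]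
  | p :: q :: rest => by
      rw [PySem.Chars.join_cons_cons, chars_join_empty (q :: rest)]; simp

lemma str_join_empty (l : List String) :
    PySem.Str.join "" l = String.ofList ((l.map String.toList).flatten) := by
  simp [PySem.Str.join, chars_join_empty]

-- ===== VERDICT (by name: the statement is the Claim_ definition above) =====
theorem solve_easy_spec : Claim_equal_solve_easy := by
  intro input_text _
  simp only [Spec_solve_easy, solve_easy, solve_easy_alt]
  rw [splitOn_eq_splitQ, foldlA_eq]
  simp only [List.nil_append, List.drop_one, List.tail_cons, List.headD_cons]
  rw [str_join_empty, chars_join_empty, foldlB_eq, main_eq]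
  simp
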